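-- pv_equiv track=rewrite | github.com/super30admin/Binary-Search-3.1 | optimise_air_routes.py | max_air_time
-- ===== SOURCE A (Python) =====
-- def max_air_time(forward, backward, max_dist):
--     forward.sort(key=lambda x: x[1])
--     backward.sort(key=lambda x: x[1])
--     res = []
--     max_sum = 0
--     for i in range(len(forward)):
--         rem = max_dist-forward[i][1]
--         temp = find_nearest(rem, backward)
--         if temp != -1:
--             v1 = forward[i][1]
--             v2 = backward[temp][1]
--             temp_sum = v1 + v2
--             if temp_sum > max_sum:
--                 max_sum = temp_sum
--                 res = [[forward[i][0], backward[temp][0]]]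
--             elif temp_sum == max_sum:
--                 res.append([forward[i][0], backward[temp][0]])
--     return res if len(res)>0 else [[]]
--
-- def find_nearest(val, backward):
--     l = 0
--     h = len(backward) - 1
--     curr = -1
--     while (l <= h):
--         m = l + (h - l) // 2
--         if backward[m][1] <= val:
--             curr = m
--             l = m + 1
--         else:
--             h = m - 1
--     return curr
-- ===== SOURCE B (Python) =====
-- def max_air_time(forward, backward, max_dist):
--     # Staged pipeline: (1) one descending-pointer pass pairing each forward
--     # route with the largest feasible backward route, collecting candidates;
--     # (2) take the max sum; (3) filter candidates equal to it.
--     # Sorts both arguments in place, like A.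
--     forward.sort(key=lambda x: x[1])
--     backward.sort(key=lambda x: x[1])
--     cands = []
--     p = len(backward) - 1
--     for f in forward:
--         rem = max_dist - f[1]
--         while p >= 0 and backward[p][1] > rem:
--             p -= 1
--         if p != -1:
--             cands.append((f[1] + backward[p][1], [f[0], backward[p][0]]))
--     best = 0
--     for s, _ in cands:
--         if s > best:
--             best = s
--     res = [pair for s, pair in cands if s == best]
--     return res if res else [[]]
-- ===== Notes on version B (the rewrite author's own statement) =====
-- stated objective: alternative
-- what changed: Replaces A's per-element binary search plus incremental reset/append bookkeeping with a staged pipeline: one monotone descending-pointer pass that collects (sum, pair) candidates, then a max pass, then a filter of candidates equal to the max.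
import Mathlib
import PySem

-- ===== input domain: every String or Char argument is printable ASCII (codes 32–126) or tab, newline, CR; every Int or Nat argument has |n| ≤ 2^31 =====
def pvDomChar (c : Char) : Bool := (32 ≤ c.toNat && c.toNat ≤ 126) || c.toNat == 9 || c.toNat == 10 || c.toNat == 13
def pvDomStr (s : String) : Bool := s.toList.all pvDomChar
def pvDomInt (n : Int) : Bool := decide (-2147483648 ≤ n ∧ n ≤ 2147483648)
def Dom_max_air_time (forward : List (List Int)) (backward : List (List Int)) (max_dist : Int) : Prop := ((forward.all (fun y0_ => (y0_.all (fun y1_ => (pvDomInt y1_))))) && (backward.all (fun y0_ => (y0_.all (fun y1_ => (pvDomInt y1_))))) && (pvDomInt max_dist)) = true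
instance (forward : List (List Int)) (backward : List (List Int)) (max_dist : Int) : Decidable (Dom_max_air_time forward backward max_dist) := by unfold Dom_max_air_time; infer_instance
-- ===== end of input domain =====

-- B replaces A's per-element binary search and incremental reset/append bookkeeping with a
-- staged pipeline (descending-pointer candidate pass, max pass, filter). Both Pythons sort
-- both argument lists IN PLACE (an observable mutation, identical in A and B); the
-- equivalence proved here is about the return value.

-- ===== PORT A =====
-- x[1] and x[0]; exact under Pre_ (every sublist has length ≥ 2)
def pv1 (x : List Int) : Int := PySem.List.pyGetD x 1 0
def pv0 (x : List Int) : Int := PySem.List.pyGetD x 0 0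
-- backward[i][1] and backward[i][0]; exact when -len ≤ i < len
def bval (bs : List (List Int)) (i : Int) : Int := pv1 (PySem.List.pyGetD bs i [])
def bkey (bs : List (List Int)) (i : Int) : Int := pv0 (PySem.List.pyGetD bs i [])

-- the while-loop of find_nearest, step for step; the Nat argument is fuel
-- (≥ the decreasing measure (h+1-l).toNat, so it never cuts the loop short)
-- m = l + (h - l) // 2, inlined at each use
def find_nearest_go (val : Int) (backward : List (List Int)) : Nat → Int → Int → Int → Int
  | 0, _, _, curr => curr
  | fuel + 1, l, h, curr =>
    if l ≤ h then
      if bval backward (l + PySem.Int.floordiv (h - l) 2) ≤ val then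
        find_nearest_go val backward fuel (l + PySem.Int.floordiv (h - l) 2 + 1) h (l + PySem.Int.floordiv (h - l) 2)
      else
        find_nearest_go val backward fuel l (l + PySem.Int.floordiv (h - l) 2 - 1) curr
    else curr

def find_nearest (val : Int) (backward : List (List Int)) : Int :=
  find_nearest_go val backward (backward.length + 1) 0 ((backward.length : Int) - 1) (-1)

-- A's main for-loop: state (res, max_sum)
def aLoop (backward : List (List Int)) (max_dist : Int) :
    List (List Int) → List (List Int) × Int → List (List Int) × Int
  | [], st => st
  | f :: rest, (res, max_sum) =>
    let rem := max_dist - pv1 f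
    let temp := find_nearest rem backward
    if temp ≠ -1 then
      let temp_sum := pv1 f + bval backward temp
      if temp_sum > max_sum then
        aLoop backward max_dist rest ([[pv0 f, bkey backward temp]], temp_sum)
      else if temp_sum = max_sum then
        aLoop backward max_dist rest (res ++ [[pv0 f, bkey backward temp]], max_sum)
      else
        aLoop backward max_dist rest (res, max_sum)
    else
      aLoop backward max_dist rest (res, max_sum)

def max_air_time (forward : List (List Int)) (backward : List (List Int)) (max_dist : Int) : List (List Int) :=
  let fs := PySem.List.sorted forward (fun x => pv1 x) false
  let bs := PySem.List.sorted backward (fun x => pv1 x) false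
  let st := aLoop bs max_dist fs ([], 0)
  if st.1.length > 0 then st.1 else [[]]

-- ===== PORT B =====
-- B's inner while loop: decrement p while p >= 0 and backward[p][1] > rem.
-- The Nat argument is fuel (= (p+1).toNat at the call site, enough for the loop to run out by itself)
def bPtr_go (backward : List (List Int)) (rem : Int) : Nat → Int → Int
  | 0, p => p
  | fuel + 1, p => if 0 ≤ p ∧ rem < bval backward p then bPtr_go backward rem fuel (p - 1) else p

def bPtr (backward : List (List Int)) (rem : Int) (p : Int) : Int :=
  bPtr_go backward rem (p + 1).toNat p

-- B stage 1: the candidate-collecting pass, threading the pointer p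
def bCands (backward : List (List Int)) (max_dist : Int) :
    List (List Int) → Int → List (Int × List Int)
  | [], _ => []
  | f :: rest, p =>
    let p' := bPtr backward (max_dist - pv1 f) p
    if p' ≠ -1 then
      (pv1 f + bval backward p', [pv0 f, bkey backward p']) :: bCands backward max_dist rest p'
    else
      bCands backward max_dist rest p'

-- B stage 2: the max pass over the candidates (best starts at 0, as in Source B)
def bBest (cands : List (Int × List Int)) : Int :=
  cands.foldl (fun m c => if c.1 > m then c.1 else m) 0

def max_air_time_alt (forward : List (List Int)) (backward : List (List Int)) (max_dist : Int) : List (List Int) :=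
  let fs := PySem.List.sorted forward (fun x => pv1 x) false
  let bs := PySem.List.sorted backward (fun x => pv1 x) false
  let cands := bCands bs max_dist fs ((bs.length : Int) - 1)
  let best := bBest cands
  let res := (cands.filter (fun c => c.1 == best)).map Prod.snd
  if res ≠ [] then res else [[]]

-- ===== PRECONDITION & SPEC =====
-- Pre_ excludes exactly the inputs on which Python A raises IndexError: the sort key
-- x[1] (and B's f[1]/backward[p][1]) needs every sublist to have at least 2 elements.
def Pre_max_air_time (forward : List (List Int)) (backward : List (List Int)) (max_dist : Int) : Prop :=
  (∀ x ∈ forward, 2 ≤ x.length) ∧ (∀ x ∈ backward, 2 ≤ x.length)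
instance (forward : List (List Int)) (backward : List (List Int)) (max_dist : Int) : Decidable (Pre_max_air_time forward backward max_dist) := by unfold Pre_max_air_time; infer_instance

def pvWitness_max_air_time : List (List Int) × List (List Int) × Int := ([[1, 2], [3, 1]], [[4, 5], [6, 3]], 7)

def Spec_max_air_time (forward : List (List Int)) (backward : List (List Int)) (max_dist : Int) (out : List (List Int)) : Prop := out = max_air_time_alt forward backward max_dist
instance (forward : List (List Int)) (backward : List (List Int)) (max_dist : Int) (out : List (List Int)) : Decidable (Spec_max_air_time forward backward max_dist out) := by unfold Spec_max_air_time; infer_instance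

-- ===== CLAIM (what is proved, stated in full; the proofs are below) =====
def Claim_equal_max_air_time : Prop := ∀ (forward : List (List Int)) (backward : List (List Int)) (max_dist : Int), Dom_max_air_time forward backward max_dist → Pre_max_air_time forward backward max_dist → Spec_max_air_time forward backward max_dist (max_air_time forward backward max_dist)

-- ===== LEMMAS AND PROOFS =====

-- A's per-element update, as a step function over one candidate
def stepA (st : List (List Int) × Int) (c : Int × List Int) : List (List Int) × Int :=
  if c.1 > st.2 then ([c.2], c.1)
  else if c.1 = st.2 then (st.1 ++ [c.2], st.2)
  else st

-- running maximum with seed ms (the fold in bBest, generalized over the seed)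
def mstar (ms : Int) (cs : List (Int × List Int)) : Int :=
  cs.foldl (fun m c => if c.1 > m then c.1 else m) ms

-- Characterization of "the largest index r of bs with bs[r][1] ≤ val, else -1".
def NearChar (bs : List (List Int)) (val r : Int) : Prop :=
  -1 ≤ r ∧ r ≤ (bs.length : Int) - 1 ∧ (r = -1 ∨ bval bs r ≤ val) ∧
    ∀ i : Int, r < i → i ≤ (bs.length : Int) - 1 → val < bval bs i

theorem nearChar_unique {bs : List (List Int)} {val r1 r2 : Int}
    (h1 : NearChar bs val r1) (h2 : NearChar bs val r2) : r1 = r2 := by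
  obtain ⟨a1, b1, c1, d1⟩ := h1
  obtain ⟨a2, b2, c2, d2⟩ := h2
  by_contra hne
  rcases lt_or_gt_of_ne hne with h | h
  · have hv := d1 r2 h b2
    rcases c2 with rfl | hle
    · omega
    · omega
  · have hv := d2 r1 h b1
    rcases c1 with rfl | hle
    · omega
    · omega

theorem bPtr_go_nearChar (bs : List (List Int)) (val : Int) :
    ∀ (fuel : Nat) (p : Int), (p + 1).toNat ≤ fuel → -1 ≤ p → p ≤ (bs.length : Int) - 1 →
      (∀ i : Int, p < i → i ≤ (bs.length : Int) - 1 → val < bval bs i) →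
      NearChar bs val (bPtr_go bs val fuel p) := by
  intro fuel
  induction fuel with
  | zero =>
    intro p hf h1 h2 hup
    have hp : p = -1 := by omega
    exact ⟨h1, h2, Or.inl hp, hup⟩
  | succ fuel ih =>
    intro p hf h1 h2 hup
    by_cases hc : 0 ≤ p ∧ val < bval bs p
    · simp only [bPtr_go, if_pos hc]
      refine ih (p - 1) (by omega) (by omega) (by omega) ?_
      intro i hi1 hi2
      rcases eq_or_lt_of_le (Int.add_one_le_iff.mpr hi1) with heq | hlt
      · rw [show i = p by omega]; exact hc.2
      · exact hup i (by omega) hi2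
    · simp only [bPtr_go, if_neg hc]
      refine ⟨h1, h2, ?_, hup⟩
      by_cases hp0 : p = -1
      · exact Or.inl hp0
      · exact Or.inr (not_lt.mp (fun hgt => hc ⟨by omega, hgt⟩))

theorem bPtr_nearChar (bs : List (List Int)) (val : Int) :
    ∀ p : Int, -1 ≤ p → p ≤ (bs.length : Int) - 1 →
      (∀ i : Int, p < i → i ≤ (bs.length : Int) - 1 → val < bval bs i) →
      NearChar bs val (bPtr bs val p) := by
  intro p h1 h2 hup
  exact bPtr_go_nearChar bs val (p + 1).toNat p le_rfl h1 h2 hup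

-- sortedness of bs as index monotonicity of bval
def BvalMono (bs : List (List Int)) : Prop :=
  ∀ i j : Int, 0 ≤ i → i ≤ j → j ≤ (bs.length : Int) - 1 → bval bs i ≤ bval bs j

theorem find_nearest_go_nearChar (bs : List (List Int)) (val : Int) (hb : BvalMono bs) :
    ∀ (fuel : Nat) (l h curr : Int), (h + 1 - l).toNat ≤ fuel →
      0 ≤ l → curr = l - 1 → h ≤ (bs.length : Int) - 1 → l ≤ h + 1 →
      (curr = -1 ∨ bval bs curr ≤ val) →
      (∀ i : Int, h < i → i ≤ (bs.length : Int) - 1 → val < bval bs i) →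
      NearChar bs val (find_nearest_go val bs fuel l h curr) := by
  intro fuel
  induction fuel with
  | zero =>
    intro l h curr hf hl hcurr hh hlh1 hcv hup
    simp only [find_nearest_go]
    exact ⟨by omega, by omega, hcv, fun i hi1 hi2 => hup i (by omega) hi2⟩
  | succ fuel ih =>
    intro l h curr hf hl hcurr hh hlh1 hcv hup
    by_cases hlh : l ≤ h
    · have hm2 : PySem.Int.floordiv (h - l) 2 = (h - l) / 2 :=
        PySem.Int.floordiv_eq_ediv_of_pos (by omega)
      simp only [find_nearest_go, if_pos hlh]
      by_cases hle : bval bs (l + PySem.Int.floordiv (h - l) 2) ≤ val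
      · rw [if_pos hle]
        exact ih _ _ _ (by omega) (by omega) (by omega) hh (by omega) (Or.inr hle) hup
      · rw [if_neg hle]
        refine ih _ _ _ (by omega) hl hcurr (by omega) (by omega) hcv ?_
        intro i hi1 hi2
        by_cases hih : h < i
        · exact hup i hih hi2
        · have hmono : bval bs (l + PySem.Int.floordiv (h - l) 2) ≤ bval bs i :=
            hb (l + PySem.Int.floordiv (h - l) 2) i (by omega) (by omega) hi2
          omega
    · simp only [find_nearest_go, if_neg hlh]
      exact ⟨by omega, by omega, hcv, fun i hi1 hi2 => hup i (by omega) hi2⟩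

theorem find_nearest_nearChar (bs : List (List Int)) (val : Int) (hb : BvalMono bs) :
    NearChar bs val (find_nearest val bs) := by
  unfold find_nearest
  exact find_nearest_go_nearChar bs val hb (bs.length + 1) 0 ((bs.length : Int) - 1) (-1)
    (by omega) le_rfl rfl le_rfl (by omega) (Or.inl rfl) (by intro i hi1 hi2; omega)

-- A's loop equals a stepA-fold over B's candidate list
theorem loop_eq (bs : List (List Int)) (md : Int) (hb : BvalMono bs) :
    ∀ fs : List (List Int), fs.Pairwise (fun a b => pv1 a ≤ pv1 b) →
    ∀ (res : List (List Int)) (ms p : Int), -1 ≤ p → p ≤ (bs.length : Int) - 1 →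
      (∀ g ∈ fs, ∀ i : Int, p < i → i ≤ (bs.length : Int) - 1 → md - pv1 g < bval bs i) →
      aLoop bs md fs (res, ms) = List.foldl stepA (res, ms) (bCands bs md fs p) := by
  intro fs
  induction fs with
  | nil => intro _ res ms p _ _ _; rfl
  | cons f rest ih =>
    intro hpw res ms p hp1 hp2 hinv
    have hpwrest := (List.pairwise_cons.mp hpw).2
    have hhead := (List.pairwise_cons.mp hpw).1
    have hchar : NearChar bs (md - pv1 f) (bPtr bs (md - pv1 f) p) :=
      bPtr_nearChar bs (md - pv1 f) p hp1 hp2 (hinv f List.mem_cons_self)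
    have htemp : find_nearest (md - pv1 f) bs = bPtr bs (md - pv1 f) p :=
      nearChar_unique (find_nearest_nearChar bs (md - pv1 f) hb) hchar
    have hinv' : ∀ g ∈ rest, ∀ i : Int, bPtr bs (md - pv1 f) p < i →
        i ≤ (bs.length : Int) - 1 → md - pv1 g < bval bs i := by
      intro g hg i hi1 hi2
      have h1 : md - pv1 f < bval bs i := hchar.2.2.2 i hi1 hi2
      have h2 : pv1 f ≤ pv1 g := hhead g hg
      omega
    rw [aLoop, bCands]
    simp only [htemp]
    by_cases hne : bPtr bs (md - pv1 f) p ≠ -1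
    · rw [if_pos hne, if_pos hne]
      simp only [List.foldl_cons]
      unfold stepA
      simp only []
      split_ifs with h1 h2
      · exact ih hpwrest _ _ _ hchar.1 hchar.2.1 hinv'
      · exact ih hpwrest _ _ _ hchar.1 hchar.2.1 hinv'
      · exact ih hpwrest _ _ _ hchar.1 hchar.2.1 hinv'
    · rw [if_neg hne, if_neg hne]
      exact ih hpwrest _ _ _ hchar.1 hchar.2.1 hinv'

theorem le_mstar (cs : List (Int × List Int)) : ∀ ms : Int, ms ≤ mstar ms cs := by
  induction cs with
  | nil => intro ms; simp [mstar]
  | cons c rest ih =>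
    intro ms
    have h := ih (if c.1 > ms then c.1 else ms)
    simp only [mstar, List.foldl_cons] at *
    split_ifs at h ⊢ <;> omega

-- the stepA-fold computes: running max, and the candidates whose sum equals it (reset on a new max)
theorem fold_char (cs : List (Int × List Int)) :
    ∀ (res : List (List Int)) (ms : Int),
      List.foldl stepA (res, ms) cs =
        ((if mstar ms cs = ms then res else []) ++
          (cs.filter (fun c => c.1 == mstar ms cs)).map Prod.snd, mstar ms cs) := by
  induction cs with
  | nil => intro res ms; simp [mstar]
  | cons c rest ih =>
    intro res ms
    have hms : mstar ms (c :: rest) = mstar (if c.1 > ms then c.1 else ms) rest := by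
      simp [mstar]
    simp only [List.foldl_cons]
    by_cases h1 : c.1 > ms
    · have hstep : stepA (res, ms) c = ([c.2], c.1) := by simp [stepA, h1]
      have hm : mstar ms (c :: rest) = mstar c.1 rest := by rw [hms, if_pos h1]
      have hge : c.1 ≤ mstar c.1 rest := le_mstar rest c.1
      rw [hstep, ih, hm, if_neg (by omega : ¬ mstar c.1 rest = ms)]
      by_cases he : c.1 = mstar c.1 rest
      · rw [if_pos he.symm]
        have hbe : (c.1 == mstar c.1 rest) = true := beq_iff_eq.mpr he
        rw [List.filter_cons, if_pos hbe]
        simp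
      · rw [if_neg (Ne.symm he)]
        have hbe : (c.1 == mstar c.1 rest) = false := by simp [he]
        simp [hbe]
    · have hm : mstar ms (c :: rest) = mstar ms rest := by rw [hms, if_neg h1]
      by_cases h2 : c.1 = ms
      · have hstep : stepA (res, ms) c = (res ++ [c.2], ms) := by simp [stepA, h2]
        rw [hstep, ih, hm]
        by_cases he : mstar ms rest = ms
        · simp [he, h2]
        · have hbe : (c.1 == mstar ms rest) = false := by
            simp [h2]; exact fun hh => he hh.symm
          simp [hbe, he]
      · have hstep : stepA (res, ms) c = (res, ms) := by simp [stepA, h1, h2]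
        rw [hstep, ih, hm]
        have hge : ms ≤ mstar ms rest := le_mstar rest ms
        have hbe : (c.1 == mstar ms rest) = false := by simp; omega
        simp [hbe]

theorem bvalMono_sorted (backward : List (List Int)) :
    BvalMono (PySem.List.sorted backward (fun x => pv1 x) false) := by
  intro i j hi hij hj
  have hlen : j.toNat < (PySem.List.sorted backward (fun x => pv1 x) false).length := by omega
  unfold bval
  rw [PySem.List.pyGetD_eq_getElem _ ([] : List Int) hi (by omega),
    PySem.List.pyGetD_eq_getElem _ ([] : List Int) (by omega) (by omega)]
  exact PySem.List.key_sorted_getElem_mono backward (fun x => pv1 x)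
    (p := i.toNat) (q := j.toNat) (by omega) hlen

-- ===== VERDICT (by name: the statement is the Claim_ definition above) =====
theorem max_air_time_spec : Claim_equal_max_air_time := by
  intro forward backward max_dist _hdom _hpre
  unfold Spec_max_air_time
  simp only [max_air_time, max_air_time_alt]
  have hb : BvalMono (PySem.List.sorted backward (fun x => pv1 x) false) :=
    bvalMono_sorted backward
  have hpw : (PySem.List.sorted forward (fun x => pv1 x) false).Pairwise
      (fun a b => pv1 a ≤ pv1 b) := PySem.List.sorted_pairwise forward (fun x => pv1 x)
  have hmain := loop_eq (PySem.List.sorted backward (fun x => pv1 x) false) max_dist hb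
    (PySem.List.sorted forward (fun x => pv1 x) false) hpw [] 0
    (((PySem.List.sorted backward (fun x => pv1 x) false).length : Int) - 1)
    (by omega) le_rfl (by intro g _ i hi1 hi2; omega)
  set cs := bCands (PySem.List.sorted backward (fun x => pv1 x) false) max_dist
    (PySem.List.sorted forward (fun x => pv1 x) false)
    (((PySem.List.sorted backward (fun x => pv1 x) false).length : Int) - 1) with hcs
  rw [hmain, fold_char]
  have hz : (if mstar 0 cs = 0 then ([] : List (List Int)) else []) = [] := by
    split <;> rfl
  rw [hz, List.nil_append]
  have hbb : mstar 0 cs = bBest cs := rfl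
  rw [hbb]
  generalize (cs.filter (fun c => c.1 == bBest cs)).map Prod.snd = r
  cases r with
  | nil => simp
  | cons x xs => simp
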